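-- pv_equiv track=rewrite | github.com/12-Twelvve/callbreak_card_game | app.py | normalBidding
-- ===== SOURCE A (Python) =====
-- def get_same_suit_cards(cards, suit):
--     return [c for c in cards if c[-1]==suit]
--
-- def get_suit(card):
--     return card[-1]
--
-- def is_ace(card):
--     if "1" == card[:-1]:
--         return True
--     else:
--         return False
--
-- def is_king(card):
--     if "K" ==card[:-1]:
--         return True
--     else:
--         return False
--
-- def have_JQT(cards):
--     for i in cards:
--         if 'J' in i or 'Q' in i or 'T' in i:
--             return True
--     return False
--
-- def have_Q(cards):
--     for i in cards:
--         if 'Q' in i :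
--             return True
--     return False
--
-- def have_K(cards):
--     for i in cards:
--         if is_king(i):
--             return True
--     return False
--
-- def have_A(cards):
--     for i in cards:
--         if is_ace(i):
--             return True
--     return False
--
-- def normalBidding(hands):
--     count=0
--     for i in hands:
--         if get_suit(i) !='S':
--             if is_ace(i):
--                 count+=1
--             elif is_king(i):
--                 k_cards = get_same_suit_cards(hands, get_suit(i))
--                 if len(k_cards) < 4 and len(k_cards)>1:
--                     count +=1
--                 elif have_JQT(k_cards) or have_A(k_cards) and len(k_cards) <= 6:
--                     count += 1
--     spades_in_hand =get_same_suit_cards(hands, "S")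
--     spades_length = len(get_same_suit_cards(hands, "S"))
--     club_length = len(get_same_suit_cards(hands, "C"))
--     diamond_length = len(get_same_suit_cards(hands, "D"))
--     heart_length = len(get_same_suit_cards(hands, "H"))
--     if  have_A(spades_in_hand):
--         count += 1
--         if have_K(spades_in_hand):
--             count +=1
--             if have_Q(spades_in_hand):
--                 count +=1
--     if spades_length >=1:
--         # for cut off
--         if club_length < 1 or diamond_length < 1 or heart_length < 1:
--             count +=1
--         if club_length < 2 or diamond_length < 2 or heart_length < 2 and spades_length >=2:
--             count +=1
--         if club_length <= 2 or diamond_length <= 2 or heart_length <= 2 and spades_length >=3: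
--             count +=1
--     if count <= 0:
--         return 1
--     if count >=8:
--         return 8
--     else:
--         return count
-- ===== SOURCE B (Python) =====
-- def normalBidding(hands):
--     # one pass: group cards by suit (last character)
--     groups = {}
--     for c in hands:
--         groups.setdefault(c[-1], []).append(c)
--     count = 0
--     for suit, cards in groups.items():
--         if suit == 'S':
--             continue
--         n = len(cards)
--         king_good = (1 < n < 4) \
--             or any('J' in c or 'Q' in c or 'T' in c for c in cards) \
--             or (any(c[:-1] == '1' for c in cards) and n <= 6)
--         for c in cards:
--             if c[:-1] == '1':
--                 count += 1
--             elif c[:-1] == 'K' and king_good: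
--                 count += 1
--     spades = groups.get('S', [])
--     if any(c[:-1] == '1' for c in spades):
--         count += 1
--         if any(c[:-1] == 'K' for c in spades):
--             count += 1
--             if any('Q' in c for c in spades):
--                 count += 1
--     sl = len(spades)
--     cl = len(groups.get('C', []))
--     dl = len(groups.get('D', []))
--     hl = len(groups.get('H', []))
--     if sl >= 1:
--         count += cl < 1 or dl < 1 or hl < 1
--         count += cl < 2 or dl < 2 or (hl < 2 and sl >= 2)
--         count += cl <= 2 or dl <= 2 or (hl <= 2 and sl >= 3)
--     return max(1, min(count, 8))
-- ===== Notes on version B (the rewrite author's own statement) =====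
-- stated objective: alternative
-- what changed: B builds a suit->cards dict in one pass and scores per suit group (ace/king counts from the group, cutoff bonuses from precomputed group lengths, clamp via max/min), replacing A's per-card loop that re-filters the whole hand for every king and each cutoff length.
import Mathlib
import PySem

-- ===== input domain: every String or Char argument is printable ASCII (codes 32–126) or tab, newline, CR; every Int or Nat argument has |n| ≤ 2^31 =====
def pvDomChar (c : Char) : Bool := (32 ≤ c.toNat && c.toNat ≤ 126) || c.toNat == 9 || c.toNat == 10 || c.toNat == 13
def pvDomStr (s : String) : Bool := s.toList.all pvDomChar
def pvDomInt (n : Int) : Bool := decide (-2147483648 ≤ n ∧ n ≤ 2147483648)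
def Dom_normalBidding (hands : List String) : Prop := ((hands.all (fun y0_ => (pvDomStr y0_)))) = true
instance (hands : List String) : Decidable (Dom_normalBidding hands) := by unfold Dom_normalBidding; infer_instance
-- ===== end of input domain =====

-- B groups the hand by suit in one pass (dict suit → cards) and scores per suit group,
-- replacing A's repeated full-hand scans; objective: simpler/alternative structure, same results.

-- ===== PORT A =====
-- card[-1]; the ' ' default is unreachable under Pre_ (no empty card strings)
def pvSuit (c : String) : Char := (c.toList.getLast?).getD ' '
-- card[:-1]
def pvRank (c : String) : List Char := c.toList.dropLast

def get_same_suit_cards (cards : List String) (suit : Char) : List String :=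
  cards.filter (fun c => pvSuit c == suit)

-- Python's "if cmp: return True else: return False" is the boolean of the comparison
def is_ace (card : String) : Bool := pvRank card = ['1']
def is_king (card : String) : Bool := pvRank card = ['K']

def have_JQT (cards : List String) : Bool :=
  cards.any (fun i => PySem.Str.isIn "J" i || PySem.Str.isIn "Q" i || PySem.Str.isIn "T" i)
def have_Q (cards : List String) : Bool := cards.any (fun i => PySem.Str.isIn "Q" i)
def have_K (cards : List String) : Bool := cards.any (fun i => is_king i)
def have_A (cards : List String) : Bool := cards.any (fun i => is_ace i)

def normalBidding (hands : List String) : Int :=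
  let count : Int := hands.foldl (fun count i =>
    if pvSuit i ≠ 'S' then
      if is_ace i then count + 1
      else if is_king i then
        let k_cards := get_same_suit_cards hands (pvSuit i)
        if k_cards.length < 4 ∧ k_cards.length > 1 then count + 1
        else if have_JQT k_cards || (have_A k_cards && decide (k_cards.length ≤ 6)) then count + 1
        else count
      else count
    else count) 0
  let spades_in_hand := get_same_suit_cards hands 'S'
  let spades_length := (get_same_suit_cards hands 'S').length
  let club_length := (get_same_suit_cards hands 'C').length
  let diamond_length := (get_same_suit_cards hands 'D').length
  let heart_length := (get_same_suit_cards hands 'H').length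
  let count :=
    if have_A spades_in_hand then
      let count := count + 1
      if have_K spades_in_hand then
        let count := count + 1
        if have_Q spades_in_hand then count + 1 else count
      else count
    else count
  let count :=
    if spades_length ≥ 1 then
      let count := if club_length < 1 ∨ diamond_length < 1 ∨ heart_length < 1 then count + 1 else count
      let count := if club_length < 2 ∨ diamond_length < 2 ∨ (heart_length < 2 ∧ spades_length ≥ 2) then count + 1 else count
      if club_length ≤ 2 ∨ diamond_length ≤ 2 ∨ (heart_length ≤ 2 ∧ spades_length ≥ 3) then count + 1 else count
    else count
  if count ≤ 0 then 1
  else if count ≥ 8 then 8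
  else count

-- ===== PORT B =====
-- groups.setdefault(c[-1], []).append(c) over the hand
def pvGroups (hands : List String) : PySem.Dict Char (List String) :=
  hands.foldl (fun d c => d.modify (pvSuit c) [] (fun l => l ++ [c])) PySem.Dict.empty

def pvKingGood (cards : List String) : Bool :=
  (decide (1 < cards.length) && decide (cards.length < 4))
  || cards.any (fun c => PySem.Str.isIn "J" c || PySem.Str.isIn "Q" c || PySem.Str.isIn "T" c)
  || (cards.any (fun c => pvRank c = ['1']) && decide (cards.length ≤ 6))

def pvGroupScore (cards : List String) : Int :=
  let kg := pvKingGood cards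
  cards.foldl (fun count c =>
    if pvRank c = ['1'] then count + 1
    else if pvRank c = ['K'] ∧ kg = true then count + 1
    else count) 0

def normalBidding_alt (hands : List String) : Int :=
  let groups := pvGroups hands
  let count : Int := groups.items.foldl (fun count p =>
    if p.1 = 'S' then count else count + pvGroupScore p.2) 0
  let spades := groups.getD 'S' []
  let count :=
    if spades.any (fun c => pvRank c = ['1']) then
      let count := count + 1
      if spades.any (fun c => pvRank c = ['K']) then
        let count := count + 1
        if spades.any (fun c => PySem.Str.isIn "Q" c) then count + 1 else count
      else count
    else count
  let sl := spades.length
  let cl := (groups.getD 'C' []).length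
  let dl := (groups.getD 'D' []).length
  let hl := (groups.getD 'H' []).length
  let count :=
    if sl ≥ 1 then
      count + (if cl < 1 ∨ dl < 1 ∨ hl < 1 then 1 else 0)
            + (if cl < 2 ∨ dl < 2 ∨ (hl < 2 ∧ sl ≥ 2) then 1 else 0)
            + (if cl ≤ 2 ∨ dl ≤ 2 ∨ (hl ≤ 2 ∧ sl ≥ 3) then 1 else 0)
    else count
  max 1 (min count 8)

-- ===== PRECONDITION & SPEC =====
-- Pre_ excludes hands containing an empty card string "": there A raises IndexError (card[-1]), and B raises too.
def Pre_normalBidding (hands : List String) : Prop := "" ∉ hands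
instance (hands : List String) : Decidable (Pre_normalBidding hands) := by unfold Pre_normalBidding; infer_instance
def pvWitness_normalBidding : List String := ["1S", "KH", "2H", "QC"]

def Spec_normalBidding (hands : List String) (out : Int) : Prop := out = normalBidding_alt hands
instance (hands : List String) (out : Int) : Decidable (Spec_normalBidding hands out) := by unfold Spec_normalBidding; infer_instance

-- ===== CLAIM (what is proved, stated in full; the proofs are below) =====
def Claim_equal_normalBidding : Prop := ∀ (hands : List String), Dom_normalBidding hands → Pre_normalBidding hands → Spec_normalBidding hands (normalBidding hands)

-- ===== LEMMAS AND PROOFS =====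

-- per-card weight of A's first loop (relative to the full hand)
def pvW (hands : List String) (i : String) : Int :=
  if pvSuit i ≠ 'S' then
    if is_ace i then 1
    else if is_king i then
      let k_cards := get_same_suit_cards hands (pvSuit i)
      if k_cards.length < 4 ∧ k_cards.length > 1 then 1
      else if have_JQT k_cards || (have_A k_cards && decide (k_cards.length ≤ 6)) then 1
      else 0
    else 0
  else 0

lemma aLoop_eq_sum (hands l : List String) (n : Int) :
    l.foldl (fun count i =>
      if pvSuit i ≠ 'S' then
        if is_ace i then count + 1
        else if is_king i then
          let k_cards := get_same_suit_cards hands (pvSuit i)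
          if k_cards.length < 4 ∧ k_cards.length > 1 then count + 1
          else if have_JQT k_cards || (have_A k_cards && decide (k_cards.length ≤ 6)) then count + 1
          else count
        else count
      else count) n
    = n + (l.map (pvW hands)).sum := by
  rw [show (fun (count : Int) (i : String) =>
      if pvSuit i ≠ 'S' then
        if is_ace i then count + 1
        else if is_king i then
          let k_cards := get_same_suit_cards hands (pvSuit i)
          if k_cards.length < 4 ∧ k_cards.length > 1 then count + 1
          else if have_JQT k_cards || (have_A k_cards && decide (k_cards.length ≤ 6)) then count + 1
          else count
        else count
      else count) = (fun count i => count + pvW hands i) from ?_]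
  · exact PySem.List.foldl_add l (pvW hands) n
  · funext count i
    simp only [pvW]
    split_ifs <;> simp

lemma groupScore_eq_sum (cards : List String) :
    pvGroupScore cards
    = (cards.map (fun c =>
        if pvRank c = ['1'] then (1 : Int)
        else if pvRank c = ['K'] ∧ pvKingGood cards = true then 1
        else 0)).sum := by
  simp only [pvGroupScore]
  rw [show (fun (count : Int) (c : String) =>
      if pvRank c = ['1'] then count + 1
      else if pvRank c = ['K'] ∧ pvKingGood cards = true then count + 1
      else count)
    = (fun count c => count + (if pvRank c = ['1'] then (1 : Int)
        else if pvRank c = ['K'] ∧ pvKingGood cards = true then 1 else 0)) from ?_]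
  · rw [PySem.List.foldl_add]; ring
  · funext count c; split_ifs <;> simp

lemma bLoop_eq_sum (l : List (Char × List String)) (n : Int) :
    l.foldl (fun count p => if p.1 = 'S' then count else count + pvGroupScore p.2) n
    = n + (l.map (fun p => if p.1 = 'S' then 0 else pvGroupScore p.2)).sum := by
  rw [show (fun (count : Int) (p : Char × List String) =>
      if p.1 = 'S' then count else count + pvGroupScore p.2)
    = (fun count p => count + (if p.1 = 'S' then 0 else pvGroupScore p.2)) from ?_]
  · exact PySem.List.foldl_add _ _ n
  · funext count p; split_ifs <;> simp

lemma groups_getD (hands : List String) (s : Char) :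
    (pvGroups hands).getD s [] = get_same_suit_cards hands s := by
  have h := PySem.Dict.getD_foldl_modify_append
      (hands.map (fun c => (pvSuit c, c))) (PySem.Dict.empty (κ := Char) (ν := List String)) s
  rw [List.foldl_map] at h
  simp only [pvGroups, get_same_suit_cards]
  simp only [PySem.Dict.getD_empty, List.nil_append] at h
  rw [h, List.filter_map]
  simp [Function.comp_def]

lemma groups_keys (hands : List String) :
    (pvGroups hands).keys = PySem.Set.ofList (hands.map pvSuit) := by
  simp only [pvGroups]
  rw [PySem.Dict.keys_foldl_modify_key hands pvSuit [] (fun _ c l => l ++ [c])]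
  simp [PySem.Set.update_nil_left]

lemma sum_single {v : Int} (K : List Char) (x : Char) (hK : K.Nodup) (hx : x ∈ K) :
    (K.map (fun s => if x = s then v else 0)).sum = v := by
  induction K with
  | nil => cases hx
  | cons a t ih =>
    rcases List.mem_cons.mp hx with h | h
    · subst h
      have ht : (t.map (fun s => if x = s then v else 0)).sum = 0 := by
        apply List.sum_eq_zero
        intro y hy
        rcases List.mem_map.mp hy with ⟨s, hs, rfl⟩
        have hxs : x ≠ s := fun he => (List.nodup_cons.mp hK).1 (he ▸ hs)
        simp [hxs]
      simp [ht]
    · have hxa : x ≠ a := fun he => (List.nodup_cons.mp hK).1 (he ▸ h)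
      simp [hxa, ih (List.nodup_cons.mp hK).2 h]

lemma sum_partition (f : String → Int) (K : List Char) (hK : K.Nodup) :
    ∀ (l : List String), (∀ c ∈ l, pvSuit c ∈ K) →
      (K.map (fun s => ((l.filter (fun c => pvSuit c == s)).map f).sum)).sum = (l.map f).sum := by
  intro l
  induction l with
  | nil =>
    intro _
    simp only [List.filter_nil, List.map_nil, List.sum_nil]
    exact List.sum_eq_zero (by intro x hx; rcases List.mem_map.mp hx with ⟨s, _, rfl⟩; rfl)
  | cons a t ih =>
    intro hmem
    have ht : ∀ c ∈ t, pvSuit c ∈ K := fun c hc => hmem c (List.mem_cons_of_mem _ hc)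
    have hstep : (fun s => (((a :: t).filter (fun c => pvSuit c == s)).map f).sum)
        = fun s => (if pvSuit a = s then f a else 0)
            + ((t.filter (fun c => pvSuit c == s)).map f).sum := by
      funext s
      by_cases h : pvSuit a = s <;> simp [h]
    rw [hstep, PySem.List.sum_map_add_int,
        sum_single K (pvSuit a) hK (hmem a (List.mem_cons_self)),
        ih ht]
    simp

lemma anyAce_eq (g : List String) : (g.any (fun c => pvRank c = ['1'])) = have_A g := by
  simp only [have_A, is_ace]

lemma kingGood_iff (g : List String) :
    pvKingGood g = true ↔
      ((g.length < 4 ∧ g.length > 1) ∨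
        (have_JQT g || (have_A g && decide (g.length ≤ 6))) = true) := by
  simp only [pvKingGood, have_JQT, anyAce_eq, Bool.or_eq_true, Bool.and_eq_true,
    decide_eq_true_eq]
  tauto

-- the group weight of a card agrees with A's per-card weight
lemma weight_agree (hands : List String) (s : Char) (c : String)
    (hc : c ∈ get_same_suit_cards hands s) (hs : s ≠ 'S') :
    (if pvRank c = ['1'] then (1 : Int)
     else if pvRank c = ['K'] ∧ pvKingGood (get_same_suit_cards hands s) = true then 1
     else 0) = pvW hands c := by
  have hsuit : pvSuit c = s := by
    have := (List.mem_filter.mp hc).2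
    simpa using this
  subst hsuit
  simp only [pvW, if_pos hs]
  by_cases ha : pvRank c = ['1']
  · simp [ha, is_ace]
  · simp only [ha, if_false, is_ace, decide_eq_true_eq]
    by_cases hk : pvRank c = ['K']
    · simp only [hk, is_king, decide_eq_true_eq, true_and]
      set g := get_same_suit_cards hands (pvSuit c) with hg
      by_cases h1 : g.length < 4 ∧ g.length > 1
      · rw [if_pos h1, if_pos ((kingGood_iff g).mpr (Or.inl h1))]; simp
      · rw [if_neg h1]
        by_cases h2 : (have_JQT g || (have_A g && decide (g.length ≤ 6))) = true
        · rw [if_pos h2, if_pos ((kingGood_iff g).mpr (Or.inr h2))]; simp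
        · rw [if_neg h2, if_neg (fun hkg => (((kingGood_iff g).mp hkg).elim h1 h2))]; simp
    · simp [hk, is_king]

lemma firstLoop_agree (hands : List String) :
    (pvGroups hands).items.foldl
      (fun count p => if p.1 = 'S' then count else count + pvGroupScore p.2) 0
    = hands.foldl (fun count i =>
      if pvSuit i ≠ 'S' then
        if is_ace i then count + 1
        else if is_king i then
          let k_cards := get_same_suit_cards hands (pvSuit i)
          if k_cards.length < 4 ∧ k_cards.length > 1 then count + 1
          else if have_JQT k_cards || (have_A k_cards && decide (k_cards.length ≤ 6)) then count + 1
          else count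
        else count
      else count) 0 := by
  rw [aLoop_eq_sum, bLoop_eq_sum]
  have hnd : (pvGroups hands).keys.Nodup := by
    rw [groups_keys]; exact PySem.Set.nodup_ofList _
  rw [PySem.Dict.items_eq_map_keys _ hnd []]
  set K := (pvGroups hands).keys with hKdef
  have hmem : ∀ c ∈ hands, pvSuit c ∈ K := by
    intro c hc
    rw [hKdef, groups_keys, PySem.Set.mem_ofList]
    exact List.mem_map_of_mem hc
  have hterm : ∀ s ∈ K,
      (if s = 'S' then (0:Int) else pvGroupScore ((pvGroups hands).getD s []))
      = ((hands.filter (fun c => pvSuit c == s)).map (pvW hands)).sum := by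
    intro s _
    by_cases hs : s = 'S'
    · subst hs
      rw [if_pos rfl]
      have : ∀ x ∈ (hands.filter (fun c => pvSuit c == 'S')).map (pvW hands), x = 0 := by
        intro x hx
        rcases List.mem_map.mp hx with ⟨c, hc, hxc⟩
        have : pvSuit c = 'S' := by simpa using (List.mem_filter.mp hc).2
        simp [← hxc, pvW, this]
      exact (List.sum_eq_zero this).symm
    · rw [if_neg hs, groups_getD, groupScore_eq_sum]
      apply congrArg
      apply List.map_congr_left
      intro c hc
      exact weight_agree hands s c hc hs
  calc (0:Int) + ((K.map (fun k => (k, (pvGroups hands).getD k []))).map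
          (fun p => if p.1 = 'S' then 0 else pvGroupScore p.2)).sum
      = (K.map (fun s => ((hands.filter (fun c => pvSuit c == s)).map (pvW hands)).sum)).sum := by
        rw [List.map_map]
        simp only [zero_add, Function.comp_def]
        exact congrArg List.sum (List.map_congr_left hterm)
    _ = 0 + (hands.map (pvW hands)).sum := by
        rw [sum_partition (pvW hands) K hnd hands hmem]; simp

-- A's chained cutoff ifs equal B's sum of 0/1 terms
lemma cut_eq (n : Int) (sl cl dl hl : Nat) :
    (let count := if cl < 1 ∨ dl < 1 ∨ hl < 1 then n + 1 else n
     let count := if cl < 2 ∨ dl < 2 ∨ (hl < 2 ∧ sl ≥ 2) then count + 1 else count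
     if cl ≤ 2 ∨ dl ≤ 2 ∨ (hl ≤ 2 ∧ sl ≥ 3) then count + 1 else count)
  = n + (if cl < 1 ∨ dl < 1 ∨ hl < 1 then 1 else 0)
      + (if cl < 2 ∨ dl < 2 ∨ (hl < 2 ∧ sl ≥ 2) then 1 else 0)
      + (if cl ≤ 2 ∨ dl ≤ 2 ∨ (hl ≤ 2 ∧ sl ≥ 3) then 1 else 0) := by
  dsimp only
  split_ifs <;> omega

-- A's final clamp equals B's max/min form
lemma clamp_eq (n : Int) :
    (if n ≤ 0 then (1 : Int) else if n ≥ 8 then 8 else n) = max 1 (min n 8) := by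
  split_ifs <;> omega

-- ===== VERDICT (by name: the statement is the Claim_ definition above) =====
set_option maxHeartbeats 1000000 in
theorem normalBidding_spec : Claim_equal_normalBidding := by
  intro hands _ _
  unfold Spec_normalBidding normalBidding normalBidding_alt
  dsimp only
  rw [← firstLoop_agree hands, groups_getD hands 'S', groups_getD hands 'C',
      groups_getD hands 'D', groups_getD hands 'H', ← clamp_eq, ← cut_eq]
  rfl
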